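-- pv_equiv track=rewrite | github.com/DiegoCabreraN/ConversorGramatical | grammarUtils/__init__.py | getEpsilonGens
-- ===== SOURCE A (Python) =====
-- def getEpsilonGens(grammarProd):
--   #Chech unitary Productions
--   replaceGens = {}
--   for gen, prods in grammarProd.items():
--     for prod in prods:
--       if len(prod) == 0 and prod not in grammarProd.keys():
--         if replaceGens.get(gen, None):
--           replaceGens[gen].append(prod)
--         else:
--           replaceGens[gen] = [prod]
--   #Delete Unitary Productions from Generator
--   for replaceGen in replaceGens.keys():
--     for prod in replaceGens[replaceGen]:
--       grammarProd[replaceGen].pop(grammarProd[replaceGen].index(prod))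
--   return replaceGens
-- ===== SOURCE B (Python) =====
-- def getEpsilonGens(grammarProd):
--     # When the empty string is itself a generator, no production qualifies for removal.
--     if "" in grammarProd:
--         return {}
--     replaceGens = {}
--     for gen, prods in grammarProd.items():
--         n = prods.count("")
--         if n:
--             replaceGens[gen] = [""] * n
--             prods[:] = [p for p in prods if p != ""]
--     return replaceGens
-- ===== Notes on version B (the rewrite author's own statement) =====
-- stated objective: simpler
-- what changed: A collects epsilon productions pair-by-pair into replaceGens with get/append bookkeeping and then deletes them in a second phase via repeated list.index/pop; B hoists the is-epsilon-a-key test out of the loops, builds each entry at once by counting the epsilon productions, and removes them with a single in-place filter.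
import Mathlib
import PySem

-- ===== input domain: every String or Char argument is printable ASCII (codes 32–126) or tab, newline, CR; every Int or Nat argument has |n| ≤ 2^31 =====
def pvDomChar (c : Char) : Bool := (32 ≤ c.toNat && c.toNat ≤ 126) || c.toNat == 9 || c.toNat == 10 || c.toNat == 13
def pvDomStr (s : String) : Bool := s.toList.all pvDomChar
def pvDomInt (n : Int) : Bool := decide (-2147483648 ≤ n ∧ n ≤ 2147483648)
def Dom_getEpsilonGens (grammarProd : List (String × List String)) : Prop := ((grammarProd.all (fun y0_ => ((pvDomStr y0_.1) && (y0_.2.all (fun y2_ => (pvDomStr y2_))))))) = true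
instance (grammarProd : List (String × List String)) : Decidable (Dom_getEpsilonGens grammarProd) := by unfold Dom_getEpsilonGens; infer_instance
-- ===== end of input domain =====

-- B replaces A's two-phase collect-then-pop-by-index with one pass (hoisted epsilon-key test,
-- prods.count('') and a filter); objective: simpler. Both A and B mutate grammarProd in place the
-- same way (they delete the epsilon productions from the surviving lists); the equivalence proved
-- here is about the RETURN value (the dict of removed epsilon productions).

-- ===== PORT A =====
-- inner 'for prod in prods' loop of A, collecting epsilon productions into replaceGens
def innerA (keys : List String) (gen : String) (rg : PySem.Dict String (List String))
    (prods : List String) : PySem.Dict String (List String) :=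
  prods.foldl (fun rg prod =>
    if PySem.Str.len prod == 0 && !(keys.contains prod) then
      -- 'if replaceGens.get(gen, None):' — truthy iff present with a non-empty list
      if !(((rg.get? gen).getD []).isEmpty) then
        -- replaceGens[gen].append(prod)
        rg.insert gen (((rg.get? gen).getD []) ++ [prod])
      else
        rg.insert gen [prod]
    else rg) rg

-- The deletion phase of A only mutates grammarProd (pop by index); it does not touch the
-- returned dict replaceGens, so the port returns after the collection phase.
def getEpsilonGens (grammarProd : List (String × List String)) : List (String × List String) :=
  (grammarProd.foldl (fun rg p => innerA (grammarProd.map (·.1)) p.1 rg p.2)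
    PySem.Dict.empty).items

-- ===== PORT B =====
def getEpsilonGens_alt (grammarProd : List (String × List String)) : List (String × List String) :=
  if (grammarProd.map (·.1)).contains "" then []
  else
    (grammarProd.foldl (fun res p =>
      if PySem.List.count p.2 "" = 0 then res
      else res.insert p.1 (List.replicate (PySem.List.count p.2 "") ""))
      PySem.Dict.empty).items

-- ===== PRECONDITION & SPEC =====
-- The argument encodes a Python dict, whose items list always has pairwise-distinct keys;
-- Pre_ states exactly that (no dict-shaped input is excluded).
def Pre_getEpsilonGens (grammarProd : List (String × List String)) : Prop :=
  (grammarProd.map Prod.fst).Nodup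
instance (grammarProd : List (String × List String)) : Decidable (Pre_getEpsilonGens grammarProd) := by
  unfold Pre_getEpsilonGens; infer_instance

def pvWitness_getEpsilonGens : (List (String × List String)) := [("S", ["a", ""]), ("A", [""])]

def Spec_getEpsilonGens (grammarProd : List (String × List String)) (out : List (String × List String)) : Prop := out = getEpsilonGens_alt grammarProd
instance (grammarProd : List (String × List String)) (out : List (String × List String)) : Decidable (Spec_getEpsilonGens grammarProd out) := by unfold Spec_getEpsilonGens; infer_instance

-- ===== CLAIM (what is proved, stated in full; the proofs are below) =====
def Claim_equal_getEpsilonGens : Prop := ∀ (grammarProd : List (String × List String)), Dom_getEpsilonGens grammarProd → Pre_getEpsilonGens grammarProd → Spec_getEpsilonGens grammarProd (getEpsilonGens grammarProd)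

-- ===== LEMMAS AND PROOFS =====

-- A's test 'len(prod) == 0 and prod not in grammarProd.keys()' when '' is not a key
lemma epsCond_of_not_mem (keys : List String) (h : keys.contains "" = false) (prod : String) :
    (PySem.Str.len prod == 0 && !(keys.contains prod)) = (prod == "") := by
  by_cases hp : prod = ""
  · subst hp; simp [PySem.Str.len_eq]; simpa using h
  · have h2 : (PySem.Str.len prod == 0) = false := by
      simp only [PySem.Str.len_eq]
      simpa [String.length_eq_zero_iff] using hp
    rw [h2]
    simp [hp]

-- A's test when '' IS a key: never true
lemma epsCond_of_mem (keys : List String) (h : keys.contains "" = true) (prod : String) :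
    (PySem.Str.len prod == 0 && !(keys.contains prod)) = false := by
  by_cases hp : prod = ""
  · subst hp; simp [PySem.Str.len_eq]; simpa using h
  · have h2 : (PySem.Str.len prod == 0) = false := by
      simp only [PySem.Str.len_eq]
      simpa [String.length_eq_zero_iff] using hp
    rw [h2]
    simp

-- the 'collect one ε' step of A's inner loop, with the dead condition removed
def stepA (gen : String) (acc : PySem.Dict String (List String)) (x : String) :
    PySem.Dict String (List String) :=
  if !(((acc.get? gen).getD []).isEmpty) then
    acc.insert gen (((acc.get? gen).getD []) ++ [x])
  else acc.insert gen [x]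

-- appending m more ε's to an already non-empty entry
lemma stepA_replicate_insert (gen : String) :
    ∀ (m : Nat) (d : PySem.Dict String (List String)) (v : List String), v ≠ [] →
      (List.replicate m "").foldl (stepA gen) (d.insert gen v)
        = d.insert gen (v ++ List.replicate m "") := by
  intro m
  induction m with
  | zero => intro d v _; simp
  | succ m ih =>
    intro d v hv
    have hstep : stepA gen (d.insert gen v) "" = (d.insert gen v).insert gen (v ++ [""]) := by
      simp [stepA, PySem.Dict.get?_insert_self, hv]
    rw [List.replicate_succ, List.foldl_cons, hstep, PySem.Dict.insert_insert_self,
        ih _ _ (by simp)]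
    simp

-- A's inner loop is stepA over the ε occurrences only
lemma innerA_eq_stepA (keys : List String) (gen : String) (hk : keys.contains "" = false)
    (rg : PySem.Dict String (List String)) (prods : List String) :
    innerA keys gen rg prods
      = (List.replicate (prods.count "") "").foldl (stepA gen) rg := by
  unfold innerA
  have h1 : ∀ (acc : PySem.Dict String (List String)), ∀ x ∈ prods,
      (if PySem.Str.len x == 0 && !(keys.contains x) then
        if !(((acc.get? gen).getD []).isEmpty) then
          acc.insert gen (((acc.get? gen).getD []) ++ [x])
        else acc.insert gen [x]
      else acc)
      = (if (x == "") = true then stepA gen acc x else acc) := by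
    intro acc x _
    rw [epsCond_of_not_mem keys hk x]; rfl
  rw [PySem.List.foldl_congr_mem _ _ _ _ h1,
      PySem.List.foldl_if_eq_foldl_filter (p := (· == "")) (f := stepA gen), List.filter_beq]

-- the whole inner loop, for a generator not yet in replaceGens
lemma innerA_eq (keys : List String) (gen : String) (hk : keys.contains "" = false)
    (rg : PySem.Dict String (List String)) (h : rg.contains gen = false) (prods : List String) :
    innerA keys gen rg prods =
      if PySem.List.count prods "" = 0 then rg
      else rg.insert gen (List.replicate (PySem.List.count prods "") "") := by
  rw [innerA_eq_stepA keys gen hk rg prods]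
  have hc : PySem.List.count prods "" = prods.count "" := rfl
  rw [hc]
  rcases hn : prods.count "" with _ | n
  · simp
  · have hget : rg.get? gen = none := (PySem.Dict.get?_eq_none_iff_contains rg gen).mpr h
    have hfirst : stepA gen rg "" = rg.insert gen [""] := by simp [stepA, hget]
    rw [List.replicate_succ, List.foldl_cons, hfirst,
        stepA_replicate_insert gen n rg [""] (by simp)]
    simp

-- the outer loop of A equals the single loop of B, entry by entry
lemma outer_eq (keys : List String) (hk : keys.contains "" = false) :
    ∀ (l : List (String × List String)) (rg : PySem.Dict String (List String)),
      (∀ p ∈ l, rg.contains p.1 = false) → (l.map Prod.fst).Nodup →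
      l.foldl (fun rg p => innerA keys p.1 rg p.2) rg
        = l.foldl (fun res p =>
            if PySem.List.count p.2 "" = 0 then res
            else res.insert p.1 (List.replicate (PySem.List.count p.2 "") "")) rg := by
  intro l
  induction l with
  | nil => intro rg _ _; rfl
  | cons p t ih =>
    intro rg h1 h2
    simp only [List.foldl_cons]
    rw [innerA_eq keys p.1 hk rg (h1 p (by simp)) p.2]
    have hnd : (t.map Prod.fst).Nodup := by
      simp only [List.map_cons, List.nodup_cons] at h2; exact h2.2
    have hhd : ∀ q ∈ t, q.1 ≠ p.1 := by
      intro q hq heq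
      simp only [List.map_cons, List.nodup_cons] at h2
      exact h2.1 (heq ▸ List.mem_map_of_mem hq)
    by_cases hz : PySem.List.count p.2 "" = 0
    · simp only [hz, if_true]
      exact ih rg (fun q hq => h1 q (by simp [hq])) hnd
    · simp only [if_neg hz]
      refine ih _ (fun q hq => ?_) hnd
      rw [PySem.Dict.contains_insert]
      simp [h1 q (by simp [hq]), hhd q hq]

-- A collects nothing when '' is itself a key
lemma foldl_innerA_of_mem (keys : List String) (hk : keys.contains "" = true)
    (l : List (String × List String)) (rg : PySem.Dict String (List String)) :
    l.foldl (fun rg p => innerA keys p.1 rg p.2) rg = rg := by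
  have h1 : ∀ (acc : PySem.Dict String (List String)), ∀ p ∈ l,
      innerA keys p.1 acc p.2 = acc := by
    intro acc p _
    unfold innerA
    have h2 : ∀ (a : PySem.Dict String (List String)), ∀ x ∈ p.2,
        (if PySem.Str.len x == 0 && !(keys.contains x) then
          if !(((a.get? p.1).getD []).isEmpty) then
            a.insert p.1 (((a.get? p.1).getD []) ++ [x])
          else a.insert p.1 [x]
        else a) = a := by
      intro a x _
      rw [epsCond_of_mem keys hk x]
      simp
    rw [PySem.List.foldl_congr_mem _ _ _ _ h2, PySem.List.foldl_ignore]
  rw [PySem.List.foldl_congr_mem _ _ _ _ h1, PySem.List.foldl_ignore]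

-- ===== VERDICT (by name: the statement is the Claim_ definition above) =====
theorem getEpsilonGens_spec : Claim_equal_getEpsilonGens := by
  intro g _ hpre
  unfold Spec_getEpsilonGens getEpsilonGens getEpsilonGens_alt
  by_cases hk : (g.map (·.1)).contains "" = true
  · rw [if_pos hk, foldl_innerA_of_mem _ hk]
    rfl
  · have hk' : (g.map (·.1)).contains "" = false := by simpa using hk
    rw [if_neg hk,
        outer_eq _ hk' g PySem.Dict.empty (fun p _ => PySem.Dict.contains_empty p.1) hpre]
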